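-- pv_equiv track=rewrite | github.com/Sina-Baharlou/Depth-VRD | lib/pytorch_misc.py | right_shift_packed_sequence_inds
-- ===== SOURCE A (Python) =====
-- def right_shift_packed_sequence_inds(lengths):
--     """
--     :param lengths: e.g. [2, 2, 2, 2, 2, 2, 2, 1, 1, 1, 1, 1]
--     :return: perm indices for the old stuff (TxB) to shift it right 1 slot so as to accomodate
--              BOS toks
--
--              visual example: of lengths = [4,3,1,1]
--     before:
--
--         a (0)  b (4)  c (7) d (8)
--         a (1)  b (5)
--         a (2)  b (6)
--         a (3)
--
--     after:
--
--         bos a (0)  b (4)  c (7)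
--         bos a (1)
--         bos a (2)
--         bos
--     """
--     cur_ind = 0
--     inds = []
--     for (l1, l2) in zip(lengths[:-1], lengths[1:]):
--         for i in range(l2):
--             inds.append(cur_ind + i)
--         cur_ind += l1
--     return inds
-- ===== SOURCE B (Python) =====
-- def right_shift_packed_sequence_inds(lengths):
--     # Divide and conquer: solve the two halves (overlapping by one segment so no
--     # pair is lost), shift the right half's indices in place by the size of the
--     # left half, and concatenate.  No running offset or prefix-sum table.
--     n = len(lengths)
--     if n < 2:
--         return []
--     if n == 2:
--         return list(range(lengths[1]))
--     mid = n // 2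
--     left = right_shift_packed_sequence_inds(lengths[:mid + 1])
--     right = right_shift_packed_sequence_inds(lengths[mid:])
--     s = sum(lengths[:mid])
--     for k in range(len(right)):
--         right[k] += s
--     left.extend(right)
--     return left
-- ===== Notes on version B (the rewrite author's own statement) =====
-- stated objective: alternative
-- what changed: Replaces A's single forward pass with a running offset by a divide-and-conquer scheme: recursively solve the two overlapping halves, shift the right half's indices in place by the left half's total length, and concatenate.
import Mathlib
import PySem

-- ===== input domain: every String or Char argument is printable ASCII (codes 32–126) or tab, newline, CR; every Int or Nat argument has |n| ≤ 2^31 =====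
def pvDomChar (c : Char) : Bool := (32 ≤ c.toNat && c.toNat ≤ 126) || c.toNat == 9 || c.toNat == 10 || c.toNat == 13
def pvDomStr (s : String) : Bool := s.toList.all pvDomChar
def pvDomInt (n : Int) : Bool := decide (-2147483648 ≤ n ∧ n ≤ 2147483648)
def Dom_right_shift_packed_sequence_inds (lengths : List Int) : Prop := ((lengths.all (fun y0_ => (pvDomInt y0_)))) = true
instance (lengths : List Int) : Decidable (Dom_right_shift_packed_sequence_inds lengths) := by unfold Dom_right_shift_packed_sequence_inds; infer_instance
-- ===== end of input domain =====

-- B solves the task by divide and conquer (recurse on two overlapping halves, shift the right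
-- half, concatenate) instead of A's forward pass with a running offset; same values
-- (alternative algorithm, not faster).  B mutates only lists it allocates itself.

-- ===== PORT A =====
-- literal transliteration: zip(lengths[:-1], lengths[1:]) folded with state (cur_ind, inds)
def right_shift_packed_sequence_inds (lengths : List Int) : List Int :=
  (((PySem.List.slice lengths none (some (-1))).zip
      (PySem.List.slice lengths (some 1) none)).foldl
    (fun (st : Int × List Int) (p : Int × Int) =>
      (st.1 + p.1, st.2 ++ (PySem.List.pyRange 0 p.2 1).map (fun i => st.1 + i)))
    (0, [])).2

-- ===== PORT B =====
-- Source B step for step: the slices lengths[:mid+1], lengths[mid:], lengths[:mid] have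
-- nonnegative bounds, ported exactly as take/drop; lengths[1] is always in range when
-- length = 2, ported as getD; the in-place shift loop over `right` is right.map (· + s);
-- left.extend(right) is left ++ …; the recursion is guarded by a fuel
-- counter (= lengths.length, always sufficient: each call shrinks the list) purely for totality.
def pvGoB : Nat → List Int → List Int
  | 0, _ => []          -- fuel exhausted; unreachable when fuel ≥ lengths.length
  | fuel + 1, lengths =>
    if lengths.length < 2 then []
    else if lengths.length = 2 then PySem.List.pyRange 0 (lengths.getD 1 0) 1
    else
      let mid := lengths.length / 2
      let left := pvGoB fuel (lengths.take (mid + 1))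
      let right := pvGoB fuel (lengths.drop mid)
      let s := (lengths.take mid).sum
      left ++ right.map (fun x => x + s)

def right_shift_packed_sequence_inds_alt (lengths : List Int) : List Int :=
  pvGoB lengths.length lengths

-- ===== PRECONDITION & SPEC =====
def Spec_right_shift_packed_sequence_inds (lengths : List Int) (out : List Int) : Prop := out = right_shift_packed_sequence_inds_alt lengths
instance (lengths : List Int) (out : List Int) : Decidable (Spec_right_shift_packed_sequence_inds lengths out) := by unfold Spec_right_shift_packed_sequence_inds; infer_instance

-- ===== CLAIM (what is proved, stated in full; the proofs are below) =====
def Claim_equal_right_shift_packed_sequence_inds : Prop := ∀ (lengths : List Int), Dom_right_shift_packed_sequence_inds lengths → Spec_right_shift_packed_sequence_inds lengths (right_shift_packed_sequence_inds lengths)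

-- ===== LEMMAS AND PROOFS =====

-- reference recursion both ports are reduced to
def pvRef (c : Int) : List Int → List Int
  | [] => []
  | [_] => []
  | a :: b :: t => (PySem.List.pyRange 0 b 1).map (fun i => c + i) ++ pvRef (c + a) (b :: t)

theorem pvA_fold (t : List Int) : ∀ (b c : Int) (acc : List Int),
    (((b :: t).dropLast.zip ((b :: t).drop 1)).foldl
      (fun (st : Int × List Int) (p : Int × Int) =>
        (st.1 + p.1, st.2 ++ (PySem.List.pyRange 0 p.2 1).map (fun i => st.1 + i)))
      (c, acc)).2 = acc ++ pvRef c (b :: t) := by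
  induction t with
  | nil => intro b c acc; simp [pvRef]
  | cons x t' ih =>
      intro b c acc
      simpa [pvRef, List.foldl_cons, List.append_assoc] using
        ih x (c + b) (acc ++ (PySem.List.pyRange 0 x 1).map (fun i => c + i))

theorem pvRef_shift (l : List Int) : ∀ (c d : Int),
    pvRef (c + d) l = (pvRef d l).map (fun x => c + x) := by
  induction l with
  | nil => intro c d; simp [pvRef]
  | cons a t ih =>
      cases t with
      | nil => intro c d; simp [pvRef]
      | cons b t' =>
          intro c d
          have h := ih c (d + a)
          simp [pvRef, List.map_map, add_assoc, h]

-- splitting pvRef at segment k (the two halves overlap at segment k)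
theorem pvRef_split (k : Nat) : ∀ (l : List Int) (c : Int), 1 ≤ k → k + 1 ≤ l.length →
    pvRef c l = pvRef c (l.take (k + 1)) ++ pvRef (c + (l.take k).sum) (l.drop k) := by
  induction k with
  | zero => intro _ _ h _; omega
  | succ k ih =>
      intro l c _ hlen
      cases l with
      | nil => simp at hlen
      | cons a t =>
          cases t with
          | nil => simp at hlen
          | cons b t' =>
              rcases Nat.eq_zero_or_pos k with h0 | hpos
              · subst h0
                simp [pvRef]
              · have hl : k + 1 ≤ (b :: t').length := by
                  simpa using Nat.le_of_succ_le_succ hlen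
                have h := ih (b :: t') (c + a) hpos hl
                have htk : (a :: b :: t').take (k + 1 + 1) = a :: (b :: t').take (k + 1) := rfl
                have htk' : (a :: b :: t').take (k + 1) = a :: (b :: t').take k := rfl
                have hdk : (a :: b :: t').drop (k + 1) = (b :: t').drop k := rfl
                rw [htk, htk', hdk]
                obtain ⟨x, t'', hx⟩ : ∃ x t'', (b :: t').take (k + 1) = x :: t'' := by
                  cases hh : (b :: t').take (k + 1) with
                  | nil => simp at hh
                  | cons x t'' => exact ⟨x, t'', rfl⟩
                have hxb : x = b := by
                  have : (b :: t').take (k + 1) = b :: t'.take k := rfl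
                  rw [this] at hx; exact (List.cons.injEq _ _ _ _ ▸ hx).1.symm
                subst hxb
                simp only [pvRef, hx, List.sum_cons]
                rw [← hx, h]
                simp [List.append_assoc, add_assoc]

-- B computes pvRef 0
theorem pvAlt_eq : ∀ (n : Nat) (l : List Int), l.length ≤ n → pvGoB n l = pvRef 0 l := by
  intro n
  induction n with
  | zero =>
      intro l hl
      have : l = [] := List.length_eq_zero_iff.mp (Nat.le_zero.mp hl)
      subst this
      simp [pvGoB, pvRef]
  | succ n ih =>
      intro l hl
      rw [pvGoB]
      split_ifs with h2 he
      · -- length < 2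
        match l, h2 with
        | [], _ => simp [pvRef]
        | [a], _ => simp [pvRef]
      · -- length = 2
        match l, he with
        | [a, b], _ => simp [pvRef]
      · -- length ≥ 3: divide and conquer
        have hmid1 : 1 ≤ l.length / 2 := by omega
        have hmid2 : l.length / 2 + 1 ≤ l.length := by omega
        simp only []
        rw [ih (l.take (l.length / 2 + 1)) (by simp only [List.length_take]; omega),
            ih (l.drop (l.length / 2)) (by simp only [List.length_drop]; omega),
            pvRef_split (l.length / 2) l 0 hmid1 hmid2]
        congr 1
        have hs := pvRef_shift (l.drop (l.length / 2)) ((l.take (l.length / 2)).sum) 0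
        simp only [add_zero] at hs
        rw [zero_add, hs]
        exact List.map_congr_left (fun a _ => add_comm a _)

-- ===== VERDICT (by name: the statement is the Claim_ definition above) =====
theorem right_shift_packed_sequence_inds_spec : Claim_equal_right_shift_packed_sequence_inds := by
  intro lengths _
  unfold Spec_right_shift_packed_sequence_inds right_shift_packed_sequence_inds
    right_shift_packed_sequence_inds_alt
  rw [PySem.List.slice_to_neg_one, PySem.List.slice_from_one,
      pvAlt_eq lengths.length lengths le_rfl]
  cases lengths with
  | nil => simp [pvRef]
  | cons b t =>
      rw [show (b :: t).tail = (b :: t).drop 1 from rfl]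
      rw [pvA_fold t b 0 []]
      simp
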